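-- pv_equiv track=rewrite | github.com/NitayDariel/agents-system-gen | graph.py | _format_agent_flow
-- ===== SOURCE A (Python) =====
-- def _format_agent_flow(flow: list[str]) -> str:
--     """Collapse consecutive duplicates and return a compact chain string.
--
--     e.g. ["comm","clarify","thinker","researcher","researcher","researcher","output"]
--     →    "[comm] → [clarify] → [thinker] → [researcher×3] → [output]"
--     """
--     if not flow:
--         return "(empty)"
--     collapsed = []
--     i = 0
--     while i < len(flow):
--         label = flow[i]
--         count = 1
--         while i + count < len(flow) and flow[i + count] == label:
--             count += 1
--         collapsed.append(f"{label}×{count}" if count > 1 else label)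
--         i += count
--     return " → ".join(f"[{s}]" for s in collapsed)
-- ===== SOURCE B (Python) =====
-- def _format_agent_flow(flow: list[str]) -> str:
--     """Run-length encode in one forward pass, then format the runs."""
--     if not flow:
--         return "(empty)"
--     runs = []  # list of [label, count]
--     for label in flow:
--         if runs and runs[-1][0] == label:
--             runs[-1][1] += 1
--         else:
--             runs.append([label, 1])
--     return " → ".join(f"[{l}×{c}]" if c > 1 else f"[{l}]" for l, c in runs)
-- ===== Notes on version B (the rewrite author's own statement) =====
-- stated objective: simpler
-- what changed: Replaced A's index-based outer while with an inner run-counting while by a single forward pass that run-length encodes the list into (label,count) pairs via a last-run accumulator, then formats the runs.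
import Mathlib
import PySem

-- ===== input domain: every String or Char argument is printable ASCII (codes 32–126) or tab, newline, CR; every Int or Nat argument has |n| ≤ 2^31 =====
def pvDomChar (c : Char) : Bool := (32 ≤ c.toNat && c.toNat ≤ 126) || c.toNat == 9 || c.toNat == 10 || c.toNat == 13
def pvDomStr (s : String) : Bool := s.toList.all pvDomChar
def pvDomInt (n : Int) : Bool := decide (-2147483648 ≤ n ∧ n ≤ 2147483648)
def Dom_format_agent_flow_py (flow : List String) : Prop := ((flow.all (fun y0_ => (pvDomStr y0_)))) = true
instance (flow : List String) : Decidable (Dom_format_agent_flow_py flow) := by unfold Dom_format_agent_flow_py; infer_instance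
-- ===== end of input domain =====

-- B replaces A's outer index loop with an inner run-counting while by a single
-- forward pass that run-length encodes the list (objective: simpler decomposition).

-- ===== PORT A =====
-- inner while: `while i + count < len(flow) and flow[i+count] == label: count += 1`
def pvCountRun (flow : List String) (i : Nat) (label : String) (count : Nat) : Nat :=
  if i + count < flow.length ∧ flow[i + count]! == label then
    pvCountRun flow i label (count + 1)
  else count
termination_by flow.length - (i + count)
decreasing_by omega

-- termination helper for the outer loop: count only grows
theorem pvCountRun_ge (flow : List String) (i : Nat) (label : String) (count : Nat) :
    count ≤ pvCountRun flow i label count := by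
  unfold pvCountRun
  split
  · exact le_trans (Nat.le_succ _) (pvCountRun_ge flow i label (count + 1))
  · exact le_refl _
termination_by flow.length - (i + count)
decreasing_by omega

-- outer while: builds `collapsed`
def pvALoop (flow : List String) (i : Nat) (collapsed : List String) : List String :=
  if h : i < flow.length then
    let label := flow[i]
    let count := pvCountRun flow i label 1
    pvALoop flow (i + count)
      (collapsed ++ [if count > 1 then label ++ "×" ++ toString count else label])
  else collapsed
termination_by flow.length - i
decreasing_by
  have := pvCountRun_ge flow i flow[i] 1
  omega

def format_agent_flow_py (flow : List String) : String :=
  if flow = [] then "(empty)"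
  else String.intercalate " → " ((pvALoop flow 0 []).map (fun s => "[" ++ s ++ "]"))

-- ===== PORT B =====
-- one step of B's forward pass: extend the last run or start a new one
def pvBStep (runs : List (String × Nat)) (label : String) : List (String × Nat) :=
  match runs.getLast? with
  | some (l, c) =>
      if l == label then runs.dropLast ++ [(l, c + 1)] else runs ++ [(label, 1)]
  | none => runs ++ [(label, 1)]

def format_agent_flow_py_alt (flow : List String) : String :=
  if flow = [] then "(empty)"
  else
    String.intercalate " → "
      ((flow.foldl pvBStep []).map
        (fun p => if p.2 > 1 then "[" ++ p.1 ++ "×" ++ toString p.2 ++ "]"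
                  else "[" ++ p.1 ++ "]"))

-- ===== PRECONDITION & SPEC =====
def Spec_format_agent_flow_py (flow : List String) (out : String) : Prop := out = format_agent_flow_py_alt flow
instance (flow : List String) (out : String) : Decidable (Spec_format_agent_flow_py flow out) := by unfold Spec_format_agent_flow_py; infer_instance

-- ===== CLAIM (what is proved, stated in full; the proofs are below) =====
def Claim_equal_format_agent_flow_py : Prop := ∀ (flow : List String), Dom_format_agent_flow_py flow → Spec_format_agent_flow_py flow (format_agent_flow_py flow)

-- ===== LEMMAS AND PROOFS =====

-- canonical run-length encoding, used only by the proofs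
def pvRuns : List String → List (String × Nat)
  | [] => []
  | x :: xs =>
      (x, 1 + (xs.takeWhile (· == x)).length) :: pvRuns (xs.dropWhile (· == x))
termination_by l => l.length
decreasing_by
  simp only [List.length_cons]
  exact Nat.lt_succ_of_le (List.length_dropWhile_le _ _)

def pvRunsAux (l : String) (c : Nat) : List String → List (String × Nat)
  | [] => [(l, c)]
  | x :: xs => if x == l then pvRunsAux l (c + 1) xs else (l, c) :: pvRunsAux x 1 xs

theorem pv_dropWhile_eq_drop {α : Type} (p : α → Bool) (l : List α) :
    l.dropWhile p = l.drop (l.takeWhile p).length := by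
  induction l with
  | nil => simp
  | cons a l ih =>
    by_cases h : p a = true <;> simp [h, ih]

theorem pvCountRun_eq (flow : List String) (i : Nat) (label : String) (c : Nat) :
    pvCountRun flow i label c
      = c + ((flow.drop (i + c)).takeWhile (· == label)).length := by
  unfold pvCountRun
  split
  · rename_i h
    rw [pvCountRun_eq flow i label (c + 1)]
    rw [List.drop_eq_getElem_cons h.1]
    simp only [List.takeWhile_cons]
    have hb : (flow[i + c] == label) = true := by
      have := h.2
      rwa [List.getElem!_eq_getElem?_getD, List.getElem?_eq_getElem h.1] at this
    simp only [hb, if_pos, List.length_cons, Nat.add_assoc]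
    omega
  · rename_i h
    by_cases hlt : i + c < flow.length
    · rw [List.drop_eq_getElem_cons hlt]
      simp only [List.takeWhile_cons]
      have hne : ¬ (flow[i + c]! == label) = true := by
        intro hb; exact h ⟨hlt, hb⟩
      rw [List.getElem!_eq_getElem?_getD, List.getElem?_eq_getElem hlt] at hne
      simp only [Option.getD_some] at hne
      simp [hne]
    · rw [List.drop_eq_nil_of_le (by omega)]
      simp
termination_by flow.length - (i + c)
decreasing_by omega

def pvFmtA (p : String × Nat) : String :=
  if p.2 > 1 then p.1 ++ "×" ++ toString p.2 else p.1

theorem pvALoop_eq (flow : List String) (i : Nat) (collapsed : List String) :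
    pvALoop flow i collapsed = collapsed ++ (pvRuns (flow.drop i)).map pvFmtA := by
  unfold pvALoop
  split
  · rename_i h
    have hcnt := pvCountRun_ge flow i flow[i] 1
    rw [pvALoop_eq flow (i + pvCountRun flow i flow[i] 1)]
    rw [pvCountRun_eq flow i flow[i] 1]
    have hdrop : flow.drop i = flow[i] :: flow.drop (i + 1) := List.drop_eq_getElem_cons h
    rw [hdrop]
    conv_rhs => rw [pvRuns]
    rw [pv_dropWhile_eq_drop, List.drop_drop]
    simp only [List.map_cons, pvFmtA, List.append_assoc, List.singleton_append]
    rw [show i + (1 + (List.takeWhile (fun x => x == flow[i]) (List.drop (i + 1) flow)).length)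
          = i + 1 + (List.takeWhile (fun x => x == flow[i]) (List.drop (i + 1) flow)).length from by omega]
  · rename_i h
    rw [List.drop_eq_nil_of_le (by omega)]
    simp [pvRuns]
termination_by flow.length - i
decreasing_by
  have := pvCountRun_ge flow i flow[i] 1
  omega

theorem pvBFold (xs : List String) : ∀ (init : List (String × Nat)) (l : String) (c : Nat),
    List.foldl pvBStep (init ++ [(l, c)]) xs = init ++ pvRunsAux l c xs := by
  induction xs with
  | nil => intro init l c; simp [pvRunsAux]
  | cons x xs ih =>
    intro init l c
    simp only [List.foldl_cons, pvRunsAux]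
    by_cases hx : x = l
    · subst hx
      have hstep : pvBStep (init ++ [(x, c)]) x = init ++ [(x, c + 1)] := by
        simp [pvBStep]
      rw [hstep, ih, if_pos (by simp)]
    · have hstep : pvBStep (init ++ [(l, c)]) x = (init ++ [(l, c)]) ++ [(x, 1)] := by
        have : (l == x) = false := by
          simp only [beq_eq_false_iff_ne, ne_eq]
          exact fun hc => hx hc.symm
        simp [pvBStep, this]
      rw [hstep, ih, if_neg (by simp [hx])]
      simp

theorem pvRunsAux_eq (xs : List String) : ∀ (l : String) (c : Nat),
    pvRunsAux l c xs = (l, c + (xs.takeWhile (· == l)).length) :: pvRuns (xs.dropWhile (· == l)) := by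
  induction xs with
  | nil =>
    intro l c
    simp only [pvRunsAux, List.takeWhile_nil, List.dropWhile_nil, List.length_nil, Nat.add_zero]
    rw [pvRuns]
  | cons x xs ih =>
    intro l c
    by_cases hx : x = l
    · subst hx
      have hb : (x == x) = true := by simp
      simp only [pvRunsAux, hb, if_true, List.takeWhile_cons, List.dropWhile_cons, List.length_cons]
      rw [ih]
      have harith : c + 1 + (List.takeWhile (fun y => y == x) xs).length
          = c + ((List.takeWhile (fun y => y == x) xs).length + 1) := by omega
      rw [harith]
    · have hxl : (x == l) = false := by simpa using hx
      rw [pvRunsAux]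
      simp only [hxl, Bool.false_eq_true, if_false, List.takeWhile_cons, List.dropWhile_cons]
      rw [ih x 1]
      conv_rhs => rw [pvRuns]
      simp

theorem pvRuns_cons (x : String) (xs : List String) :
    pvRuns (x :: xs) = pvRunsAux x 1 xs := by
  rw [pvRunsAux_eq]
  conv_lhs => rw [pvRuns]

theorem pvBFoldAll (x : String) (xs : List String) :
    List.foldl pvBStep [] (x :: xs) = pvRuns (x :: xs) := by
  have h0 : pvBStep [] x = [] ++ [(x, 1)] := by simp [pvBStep]
  rw [List.foldl_cons, h0, pvBFold, pvRuns_cons]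
  simp

theorem pvFmt_bracket (p : String × Nat) :
    "[" ++ pvFmtA p ++ "]"
      = (if p.2 > 1 then "[" ++ p.1 ++ "×" ++ toString p.2 ++ "]" else "[" ++ p.1 ++ "]") := by
  rcases p with ⟨l, c⟩
  simp only [pvFmtA]
  split <;> simp [String.append_assoc]

-- ===== VERDICT (by name: the statement is the Claim_ definition above) =====
theorem format_agent_flow_py_spec : Claim_equal_format_agent_flow_py := by
  intro flow _
  unfold Spec_format_agent_flow_py format_agent_flow_py format_agent_flow_py_alt
  cases flow with
  | nil => rfl
  | cons x xs =>
    rw [if_neg (List.cons_ne_nil x xs), if_neg (List.cons_ne_nil x xs)]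
    rw [pvALoop_eq, List.drop_zero, pvBFoldAll, List.nil_append, List.map_map]
    congr 1
    apply List.map_congr_left
    intro p _
    exact pvFmt_bracket p
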